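-- pv_equiv track=rewrite | github.com/s-schaner/HotMama | viz/heatmap.py | draw_court_background
-- ===== SOURCE A (Python) =====
-- from typing import Callable, Iterable, Literal, Tuple
--
-- CANVAS_SCALE = 40
--
-- def draw_court_background(width: int, height: int) -> list[list[Tuple[int, int, int]]]:
--     background_color = (13, 59, 102)
--     canvas = [[background_color for _ in range(width)] for _ in range(height)]
--     mid_y = height // 2
--     for x in range(width):
--         canvas[mid_y][x] = (255, 255, 255)
--     for y_meter in (6, 12):
--         y = int(y_meter * CANVAS_SCALE)
--         if 0 <= y < height:
--             for x in range(width):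
--                 canvas[y][x] = (200, 200, 200)
--     return canvas
-- ===== SOURCE B (Python) =====
-- CANVAS_SCALE = 40
--
-- def draw_court_background(width, height):
--     mid_y = height // 2
--     rows = []
--     for y in range(height):
--         color = (13, 59, 102)
--         if y == mid_y:
--             color = (255, 255, 255)
--         if y == 6 * CANVAS_SCALE or y == 12 * CANVAS_SCALE:
--             color = (200, 200, 200)
--         rows.append([color] * width)
--     return rows
-- ===== Notes on version B (the rewrite author's own statement) =====
-- stated objective: simpler
-- what changed: B classifies each row's single color in one pass over y (background/white/gray decided per row) and builds the row by replication, instead of A's fill-everything-then-overwrite-rows passes with per-pixel inner loops.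
import Mathlib
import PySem

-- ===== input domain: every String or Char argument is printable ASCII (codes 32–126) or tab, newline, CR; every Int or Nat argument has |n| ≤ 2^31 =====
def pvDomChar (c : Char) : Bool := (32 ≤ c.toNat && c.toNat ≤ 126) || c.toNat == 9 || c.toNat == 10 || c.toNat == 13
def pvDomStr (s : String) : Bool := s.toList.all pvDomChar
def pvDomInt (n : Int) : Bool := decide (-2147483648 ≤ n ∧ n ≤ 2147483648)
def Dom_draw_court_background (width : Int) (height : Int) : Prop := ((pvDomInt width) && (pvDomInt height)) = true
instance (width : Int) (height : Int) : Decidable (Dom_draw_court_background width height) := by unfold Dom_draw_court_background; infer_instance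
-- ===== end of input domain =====

-- B replaces A's fill-everything-then-overwrite-rows passes by a single pass that picks each
-- row's one color and replicates it (objective: simpler); return-value equivalence only.

-- ===== PORT A =====
-- canvas[i][x] = c  (Python indexing; total form, exact under Pre_)
def pvSetPix (cv : List (List (Int × Int × Int))) (i : Int) (x : Int)
    (c : Int × Int × Int) : List (List (Int × Int × Int)) :=
  PySem.List.pySetD cv i (PySem.List.pySetD (PySem.List.pyGetD cv i []) x c)

def draw_court_background (width : Int) (height : Int) : List (List (Int × Int × Int)) :=
  let background_color : Int × Int × Int := (13, 59, 102)
  let canvas := (PySem.List.pyRange 0 height 1).map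
    (fun _ => (PySem.List.pyRange 0 width 1).map (fun _ => background_color))
  let mid_y := PySem.Int.floordiv height 2
  let canvas := (PySem.List.pyRange 0 width 1).foldl
    (fun cv x => pvSetPix cv mid_y x (255, 255, 255)) canvas
  let canvas := [(6 : Int), 12].foldl (fun cv y_meter =>
      let y := y_meter * 40
      if 0 ≤ y ∧ y < height then
        (PySem.List.pyRange 0 width 1).foldl
          (fun cv x => pvSetPix cv y x (200, 200, 200)) cv
      else cv) canvas
  canvas

-- ===== PORT B =====
def pvRowColor (y : Int) (mid_y : Int) : Int × Int × Int :=
  let color : Int × Int × Int := (13, 59, 102)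
  let color := if y = mid_y then (255, 255, 255) else color
  if y = 6 * 40 ∨ y = 12 * 40 then (200, 200, 200) else color

def draw_court_background_alt (width : Int) (height : Int) : List (List (Int × Int × Int)) :=
  let mid_y := PySem.Int.floordiv height 2
  (PySem.List.pyRange 0 height 1).foldl
    (fun rows y => rows ++ [PySem.List.pyRepeat [pvRowColor y mid_y] width]) []

-- ===== PRECONDITION & SPEC =====
-- Pre_ excludes exactly the inputs where A raises IndexError: width > 0 with height ≤ 0
-- (the empty canvas is indexed at the mid line).
def Pre_draw_court_background (width : Int) (height : Int) : Prop := width ≤ 0 ∨ 0 < height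
instance (width : Int) (height : Int) : Decidable (Pre_draw_court_background width height) := by
  unfold Pre_draw_court_background; infer_instance

def pvWitness_draw_court_background : Int × Int := (2, 3)

def Spec_draw_court_background (width : Int) (height : Int)
    (out : List (List (Int × Int × Int))) : Prop := out = draw_court_background_alt width height
instance (width : Int) (height : Int) (out : List (List (Int × Int × Int))) :
    Decidable (Spec_draw_court_background width height out) := by
  unfold Spec_draw_court_background; infer_instance

-- ===== CLAIM (what is proved, stated in full; the proofs are below) =====
def Claim_equal_draw_court_background : Prop := ∀ (width : Int) (height : Int),
  Dom_draw_court_background width height → Pre_draw_court_background width height →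
  Spec_draw_court_background width height (draw_court_background width height)

-- ===== LEMMAS AND PROOFS =====

-- range(0, w) is range(0, w.toNat): both are empty for w ≤ 0
lemma pvRange_toNat (w : Int) :
    PySem.List.pyRange 0 w 1 = PySem.List.pyRange 0 ((w.toNat : Nat) : Int) 1 := by
  rw [PySem.List.pyRange_one, PySem.List.pyRange_one]
  congr 2
  omega

-- the inner per-pixel loop "for x in range(n): row[x] = c" on a row
lemma pvFillRow (c : Int × Int × Int) (n : Nat) (row : List (Int × Int × Int)) :
    (PySem.List.pyRange 0 ((n : Nat) : Int) 1).foldl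
      (fun r x => PySem.List.pySetD r x c) row
    = List.replicate (min n row.length) c ++ row.drop n := by
  induction n with
  | zero => simp [PySem.List.pyRange_one_eq_nil]
  | succ n ih =>
    have hc : ((n + 1 : Nat) : Int) = ((n : Nat) : Int) + 1 := by push_cast; ring
    rw [hc, PySem.List.pyRange_one_succ_right (by positivity), List.foldl_append]
    simp only [List.foldl_cons, List.foldl_nil, ih, PySem.List.pySetD_natCast]
    by_cases hn : n < row.length
    · rw [List.set_append]
      have hlen : (List.replicate (min n row.length) c).length = n := by
        simp [Nat.min_eq_left (Nat.le_of_lt hn)]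
      rw [if_neg (by omega)]
      have hdrop : row.drop n = row[n] :: row.drop (n + 1) := by
        exact List.drop_eq_getElem_cons hn
      rw [hlen]
      simp only [Nat.sub_self, hdrop, List.set_cons_zero]
      rw [Nat.min_eq_left (Nat.le_of_lt hn), Nat.min_eq_left (by omega : n + 1 ≤ row.length),
        List.replicate_succ']
      simp
    · have h1 : row.drop n = [] := List.drop_eq_nil_of_le (by omega)
      have h2 : row.drop (n + 1) = [] := List.drop_eq_nil_of_le (by omega)
      rw [h1, h2]
      rw [List.set_eq_of_length_le (by simp only [List.append_nil, List.length_replicate]; omega)]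
      rw [Nat.min_eq_right (by omega), Nat.min_eq_right (by omega)]

-- the per-row loop "for x in xs: canvas[i][x] = c" rewrites row i in place
lemma pvColFold (xs : List Int) (i : Nat) (c : Int × Int × Int) :
    ∀ (cv : List (List (Int × Int × Int))) (hi : i < cv.length),
    xs.foldl (fun cv x => pvSetPix cv ((i : Nat) : Int) x c) cv
      = cv.set i (xs.foldl (fun r x => PySem.List.pySetD r x c) cv[i]) := by
  induction xs with
  | nil =>
    intro cv hi
    simp only [List.foldl_nil]
    exact (List.set_getElem_self hi).symm
  | cons x xs ih =>
    intro cv hi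
    simp only [List.foldl_cons]
    have hstep : pvSetPix cv ((i : Nat) : Int) x c
        = cv.set i (PySem.List.pySetD cv[i] x c) := by
      simp [pvSetPix, PySem.List.pySetD_natCast, PySem.List.pyGetD_natCast,
        List.getD_eq_getElem?_getD, List.getElem?_eq_getElem hi]
    rw [hstep, ih _ (by simpa using hi)]
    rw [List.set_set]
    congr 1
    rw [List.getElem_set]
    simp

-- ===== VERDICT (by name: the statement is the Claim_ definition above) =====
theorem draw_court_background_spec : Claim_equal_draw_court_background := by
  intro w h _ hpre
  unfold Spec_draw_court_background draw_court_background draw_court_background_alt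
  dsimp only
  by_cases hh : 0 < h
  · -- 0 < h : both sides are height rows; compare row by row
    have hdiv := Int.mul_ediv_add_emod h 2
    have hm1 := Int.emod_nonneg h (by norm_num : (2:Int) ≠ 0)
    have hm2 := Int.emod_lt_of_pos h (by norm_num : (0:Int) < 2)
    have hd0 : (0:Int) ≤ h / 2 := by omega
    have hdl : h / 2 < h := by omega
    have hmid : PySem.Int.floordiv h 2 = (((h / 2).toNat : Nat) : Int) := by
      rw [PySem.Int.floordiv_eq_ediv_of_pos (by omega)]
      exact (Int.toNat_of_nonneg hd0).symm
    set m : Nat := (h / 2).toNat with hm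
    set N : Nat := h.toNat with hN
    set W : Nat := w.toNat with hW
    have hmN : m < N := by omega
    -- the all-background canvas
    set row0 : List (Int × Int × Int) :=
      (PySem.List.pyRange 0 ((W : Nat) : Int) 1).map (fun _ => ((13:Int), (59:Int), (102:Int))) with hrow0
    have hrow0len : row0.length = W := by simp [hrow0, PySem.List.length_pyRange_one]
    set canvas0 : List (List (Int × Int × Int)) :=
      (PySem.List.pyRange 0 h 1).map (fun _ => row0) with hcanvas0
    have hc0len : canvas0.length = N := by simp [hcanvas0, PySem.List.length_pyRange_one, hN]
    -- a full inner pass over a length-W row is row replacement by a constant row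
    have hfill : ∀ (c : Int × Int × Int) (r : List (Int × Int × Int)), r.length = W →
        (PySem.List.pyRange 0 ((W : Nat) : Int) 1).foldl
          (fun r x => PySem.List.pySetD r x c) r = List.replicate W c := by
      intro c r hr
      rw [pvFillRow, hr, Nat.min_self, List.drop_eq_nil_of_le (by omega), List.append_nil]
    -- one white/gray pass at row index i
    have hpass : ∀ (i : Nat) (c : Int × Int × Int) (cv : List (List (Int × Int × Int)))
        (hcv : cv.length = N) (hrows : ∀ k (hk : k < cv.length), (cv[k]).length = W),
        i < N →
        (PySem.List.pyRange 0 ((W : Nat) : Int) 1).foldl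
          (fun cv x => pvSetPix cv ((i : Nat) : Int) x c) cv = cv.set i (List.replicate W c) := by
      intro i c cv hcv hrows hiN
      rw [pvColFold _ _ _ cv (by omega)]
      rw [hfill c _ (hrows i (by omega))]
    have hrows0 : ∀ k (hk : k < canvas0.length), (canvas0[k]).length = W := by
      intro k hk
      simp only [hcanvas0, List.getElem_map]
      exact hrow0len
    rw [pvRange_toNat w, hmid, ← hW,
      PySem.List.foldl_append_singleton_eq_map
        (fun y => PySem.List.pyRepeat [pvRowColor y (((m : Nat) : Int))] w)]
    rw [hpass m _ canvas0 hc0len hrows0 hmN]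
    set cv1 := canvas0.set m (List.replicate W ((255:Int), (255:Int), (255:Int))) with hcv1
    have hc1len : cv1.length = N := by simp [hcv1, hc0len]
    have hrows1 : ∀ k (hk : k < cv1.length), (cv1[k]).length = W := by
      intro k hk
      simp only [hcv1, List.getElem_set]
      split
      · simp
      · exact hrows0 k (by simp only [hc1len] at hk; omega)
    simp only [List.foldl_cons, List.foldl_nil, List.nil_append]
    -- the two gray passes
    have h640 : ((6:Int) * 40) = ((240 : Nat) : Int) := by norm_num
    have h1240 : ((12:Int) * 40) = ((480 : Nat) : Int) := by norm_num
    by_cases h240 : (6:Int) * 40 < h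
    · rw [if_pos (show (0:Int) ≤ 6 * 40 ∧ 6 * 40 < h from ⟨by norm_num, h240⟩), h640,
        hpass 240 _ cv1 hc1len hrows1 (by omega)]
      set cv2 := cv1.set 240 (List.replicate W ((200:Int), (200:Int), (200:Int))) with hcv2
      have hc2len : cv2.length = N := by simp [hcv2, hc1len]
      have hrows2 : ∀ k (hk : k < cv2.length), (cv2[k]).length = W := by
        intro k hk
        simp only [hcv2, List.getElem_set]
        split
        · simp
        · exact hrows1 k (by simp only [hc2len] at hk; omega)
      by_cases h480 : (12:Int) * 40 < h
      · rw [if_pos (show (0:Int) ≤ 12 * 40 ∧ 12 * 40 < h from ⟨by norm_num, h480⟩), h1240,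
          hpass 480 _ cv2 hc2len hrows2 (by omega)]
        apply List.ext_getElem
        · simp [hc2len, PySem.List.length_pyRange_one, hN]
        · intro k hk1 hk2
          have hkN : k < N := by simpa [hc2len] using hk1
          simp only [List.getElem_set, List.getElem_map, hcv2, hcv1, hcanvas0,
            PySem.List.getElem_pyRange_one, PySem.List.pyRepeat_singleton, pvRowColor,
            zero_add, hrow0]
          rw [show ((PySem.List.pyRange 0 ((W : Nat) : Int) 1).map
            (fun _ => ((13:Int), (59:Int), (102:Int)))) = List.replicate W (13, 59, 102) by
            simp [List.map_const', PySem.List.length_pyRange_one]]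
          split_ifs with e1 e2 e3 e4 e5 e6 e7 <;>
            first
            | rfl
            | (exfalso; omega)
      · rw [if_neg (show ¬ ((0:Int) ≤ 12 * 40 ∧ 12 * 40 < h) from fun hc => h480 hc.2)]
        apply List.ext_getElem
        · simp [hc2len, PySem.List.length_pyRange_one, hN]
        · intro k hk1 hk2
          have hkN : k < N := by simpa [hc2len] using hk1
          simp only [List.getElem_set, List.getElem_map, hcv2, hcv1, hcanvas0,
            PySem.List.getElem_pyRange_one, PySem.List.pyRepeat_singleton, pvRowColor,
            zero_add, hrow0]
          rw [show ((PySem.List.pyRange 0 ((W : Nat) : Int) 1).map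
            (fun _ => ((13:Int), (59:Int), (102:Int)))) = List.replicate W (13, 59, 102) by
            simp [List.map_const', PySem.List.length_pyRange_one]]
          split_ifs with e1 e2 e3 e4 e5 e6 <;>
            first
            | rfl
            | (exfalso; omega)
    · have h480 : ¬ ((12:Int) * 40 < h) := by omega
      rw [if_neg (show ¬ ((0:Int) ≤ 6 * 40 ∧ 6 * 40 < h) from fun hc => h240 hc.2),
        if_neg (show ¬ ((0:Int) ≤ 12 * 40 ∧ 12 * 40 < h) from fun hc => h480 hc.2)]
      apply List.ext_getElem
      · simp [hc1len, PySem.List.length_pyRange_one, hN]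
      · intro k hk1 hk2
        have hkN : k < N := by simpa [hc1len] using hk1
        simp only [List.getElem_set, List.getElem_map, hcv1, hcanvas0,
          PySem.List.getElem_pyRange_one, PySem.List.pyRepeat_singleton, pvRowColor,
          zero_add, hrow0]
        rw [show ((PySem.List.pyRange 0 ((W : Nat) : Int) 1).map
          (fun _ => ((13:Int), (59:Int), (102:Int)))) = List.replicate W (13, 59, 102) by
          simp [List.map_const', PySem.List.length_pyRange_one]]
        split_ifs with e1 e2 e3 e4 e5 <;>
          first
          | rfl
          | (exfalso; omega)
  · have hw : w ≤ 0 := by rcases hpre with hw | hh'; exact hw; omega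
    rw [PySem.List.pyRange_one_eq_nil (by omega : h ≤ 0),
        PySem.List.pyRange_one_eq_nil (by omega : w ≤ 0)]
    simp [List.foldl]
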